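-- pv_equiv track=rewrite | github.com/pepeL95/repoff | backend/src/repoff/orchestration/middlewares/evidence_memory.py | _merge_memory
-- ===== SOURCE A (Python) =====
-- from typing import Any, Annotated, cast
--
-- MAX_EVIDENCE_ITEMS = 8
--
-- MAX_FAILURE_ITEMS = 4
--
-- def _merge_memory(
--
--     existing: list[dict[str, Any]],
--     updates: list[dict[str, Any]],
-- ) -> list[dict[str, Any]]:
--     merged: list[dict[str, Any]] = [
--         {
--             "tool": str(item.get("tool", "")),
--             "source_path": str(item.get("source_path", "")),
--             "summary": str(item.get("summary", "")),
--             "dedupe_key": str(item.get("dedupe_key", "")),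
--             "status": str(item.get("status", "success")),
--         }
--         for item in existing
--         if item.get("summary")
--     ]
--     for update in updates:
--         dedupe_key = str(update.get("dedupe_key", ""))
--         if dedupe_key:
--             merged = [item for item in merged if item.get("dedupe_key") != dedupe_key]
--         merged.append(update)
--     successes = [item for item in merged if item.get("status") == "success"]
--     failures = [item for item in merged if item.get("status") != "success"]
--     return successes[-MAX_EVIDENCE_ITEMS:] + failures[-MAX_FAILURE_ITEMS:]
-- ===== SOURCE B (Python) =====
-- MAX_EVIDENCE_ITEMS = 8
--
-- MAX_FAILURE_ITEMS = 4
--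
--
-- def _merge_memory(existing, updates):
--     # One reverse pass over updates with a seen-set: last occurrence of each
--     # nonempty dedupe_key wins; the seen-set then tells which existing items die.
--     seen = set()
--     kept_rev = []
--     for update in reversed(updates):
--         key = str(update.get("dedupe_key", ""))
--         if key and key in seen:
--             continue
--         if key:
--             seen.add(key)
--         kept_rev.append(update)
--     kept_rev.reverse()
--     survivors = []
--     for item in existing:
--         if not item.get("summary"):
--             continue
--         norm = {
--             "tool": str(item.get("tool", "")),
--             "source_path": str(item.get("source_path", "")),
--             "summary": str(item.get("summary", "")),
--             "dedupe_key": str(item.get("dedupe_key", "")),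
--             "status": str(item.get("status", "success")),
--         }
--         if norm["dedupe_key"] not in seen:
--             survivors.append(norm)
--     merged = survivors + kept_rev
--     successes = []
--     failures = []
--     for item in merged:
--         if item.get("status") == "success":
--             successes.append(item)
--         else:
--             failures.append(item)
--     return successes[-MAX_EVIDENCE_ITEMS:] + failures[-MAX_FAILURE_ITEMS:]
-- ===== Notes on version B (the rewrite author's own statement) =====
-- stated objective: alternative
-- what changed: Replaces A's per-update rebuild of the whole merged list (a filter pass over all accumulated items for every keyed update) with a single reverse pass over updates maintaining a seen-set of dedupe keys, a single pass over existing dropping items whose key is in that set, and a one-pass status partition.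
import Mathlib
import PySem

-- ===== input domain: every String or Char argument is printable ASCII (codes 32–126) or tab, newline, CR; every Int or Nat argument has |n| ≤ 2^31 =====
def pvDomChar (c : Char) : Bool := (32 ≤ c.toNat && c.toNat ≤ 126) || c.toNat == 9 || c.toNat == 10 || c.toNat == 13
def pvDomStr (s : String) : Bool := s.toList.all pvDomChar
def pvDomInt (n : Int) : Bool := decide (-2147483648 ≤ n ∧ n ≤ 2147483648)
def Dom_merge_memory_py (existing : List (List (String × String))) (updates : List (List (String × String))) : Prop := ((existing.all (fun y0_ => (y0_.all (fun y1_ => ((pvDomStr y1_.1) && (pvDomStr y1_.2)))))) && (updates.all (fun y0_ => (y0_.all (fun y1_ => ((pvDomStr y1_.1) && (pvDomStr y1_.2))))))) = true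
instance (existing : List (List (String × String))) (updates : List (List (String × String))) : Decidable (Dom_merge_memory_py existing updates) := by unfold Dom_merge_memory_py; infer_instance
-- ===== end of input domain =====

-- B replaces A's per-update rebuild of the merged list with one reverse pass over
-- updates (seen-set of dedupe keys), one pass over existing dropping items whose key
-- was seen, and a one-pass status partition (alternative decomposition, same values).

-- ===== PORT A =====
-- dict.get modelled on the association list (value or None / default); shared by both ports
def pvGet? (d : List (String × String)) (k : String) : Option String :=
  (d.find? (fun p => p.1 == k)).map (·.2)

def pvGetD (d : List (String × String)) (k dflt : String) : String :=
  (pvGet? d k).getD dflt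

-- the normalized dict literal both Pythons build for an existing item
def pvNorm (item : List (String × String)) : List (String × String) :=
  [("tool", pvGetD item "tool" ""),
   ("source_path", pvGetD item "source_path" ""),
   ("summary", pvGetD item "summary" ""),
   ("dedupe_key", pvGetD item "dedupe_key" ""),
   ("status", pvGetD item "status" "success")]

-- A's 'for update in updates' loop: filter merged by the key, then append the raw update
def pvMergeLoopA (merged : List (List (String × String))) :
    List (List (String × String)) → List (List (String × String))
  | [] => merged
  | u :: rest =>
    let k := pvGetD u "dedupe_key" ""
    let merged' := if k != "" then merged.filter (fun item => pvGet? item "dedupe_key" != some k) else merged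
    pvMergeLoopA (merged' ++ [u]) rest

def merge_memory_py (existing : List (List (String × String))) (updates : List (List (String × String))) : List (List (String × String)) :=
  let merged0 := (existing.filter (fun item => pvGetD item "summary" "" != "")).map pvNorm
  let merged := pvMergeLoopA merged0 updates
  let successes := merged.filter (fun item => pvGet? item "status" == some "success")
  let failures := merged.filter (fun item => pvGet? item "status" != some "success")
  PySem.List.slice successes (some (-8)) none ++ PySem.List.slice failures (some (-4)) none

-- ===== PORT B =====
-- B's reverse pass: walk reversed(updates), skip already-seen nonempty keys,
-- collect kept updates (in processing order) and the final seen-set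
def pvAltDedup : List (List (String × String)) → PySem.Set String →
    List (List (String × String)) × PySem.Set String
  | [], seen => ([], seen)
  | u :: rest, seen =>
    let k := pvGetD u "dedupe_key" ""
    if k != "" && PySem.Set.contains seen k then pvAltDedup rest seen
    else
      let seen' := if k != "" then PySem.Set.add seen k else seen
      let r := pvAltDedup rest seen'
      (u :: r.1, r.2)

-- B's survivors pass over existing
def pvAltSurvivors (seen : PySem.Set String) :
    List (List (String × String)) → List (List (String × String))
  | [] => []
  | item :: rest =>
    if pvGetD item "summary" "" != "" then
      let n := pvNorm item
      if PySem.Set.contains seen (pvGetD n "dedupe_key" "") then pvAltSurvivors seen rest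
      else n :: pvAltSurvivors seen rest
    else pvAltSurvivors seen rest

-- B's one-pass partition into successes/failures
def pvAltPartition (succ fail : List (List (String × String))) :
    List (List (String × String)) → List (List (String × String)) × List (List (String × String))
  | [] => (succ, fail)
  | item :: rest =>
    if pvGet? item "status" == some "success" then pvAltPartition (succ ++ [item]) fail rest
    else pvAltPartition succ (fail ++ [item]) rest

def merge_memory_py_alt (existing : List (List (String × String))) (updates : List (List (String × String))) : List (List (String × String)) :=
  let p := pvAltDedup updates.reverse PySem.Set.empty
  let kept := p.1.reverse
  let survivors := pvAltSurvivors p.2 existing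
  let sf := pvAltPartition [] [] (survivors ++ kept)
  PySem.List.slice sf.1 (some (-8)) none ++ PySem.List.slice sf.2 (some (-4)) none

-- ===== PRECONDITION & SPEC =====
def Spec_merge_memory_py (existing : List (List (String × String))) (updates : List (List (String × String))) (out : List (List (String × String))) : Prop := out = merge_memory_py_alt existing updates
instance (existing : List (List (String × String))) (updates : List (List (String × String))) (out : List (List (String × String))) : Decidable (Spec_merge_memory_py existing updates out) := by unfold Spec_merge_memory_py; infer_instance

-- ===== CLAIM (what is proved, stated in full; the proofs are below) =====
def Claim_equal_merge_memory_py : Prop := ∀ (existing : List (List (String × String))) (updates : List (List (String × String))), Dom_merge_memory_py existing updates → Spec_merge_memory_py existing updates (merge_memory_py existing updates)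

-- ===== LEMMAS AND PROOFS =====

-- the update's dedupe key, as A computes it
def pvKey (u : List (String × String)) : String := pvGetD u "dedupe_key" ""

-- does item survive all the filters performed while processing us (A's view)?
def pvSurv (us : List (List (String × String))) (item : List (String × String)) : Bool :=
  us.all (fun u => pvKey u == "" || pvGet? item "dedupe_key" != some (pvKey u))

-- the updates A keeps: u survives the filters of the remaining updates
def pvKeptA : List (List (String × String)) → List (List (String × String))
  | [] => []
  | u :: rest => (if pvSurv rest u then [u] else []) ++ pvKeptA rest

theorem pvMergeLoopA_eq (us : List (List (String × String))) :
    ∀ m, pvMergeLoopA m us = m.filter (pvSurv us) ++ pvKeptA us := by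
  induction us with
  | nil =>
    intro m
    simp only [pvMergeLoopA, pvKeptA, List.append_nil]
    exact (List.filter_eq_self.mpr (fun a _ => by simp [pvSurv])).symm
  | cons u rest ih =>
    intro m
    simp only [pvMergeLoopA, pvKeptA]
    rw [ih, List.filter_append]
    have hfilter :
        (if (pvGetD u "dedupe_key" "" != "") = true then m.filter (fun item => pvGet? item "dedupe_key" != some (pvGetD u "dedupe_key" "")) else m).filter (pvSurv rest)
        = m.filter (pvSurv (u :: rest)) := by
      by_cases h : pvGetD u "dedupe_key" "" = ""
      · rw [if_neg (by simp [h])]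
        apply List.filter_congr
        intro x _
        simp [pvSurv, pvKey, List.all_cons, h]
      · rw [if_pos (by simpa [bne_iff_ne] using h)]
        rw [List.filter_filter]
        apply List.filter_congr
        intro x _
        have hk : (pvKey u == "") = false := by simp [pvKey, h]
        simp only [pvSurv, List.all_cons, pvKey] at hk ⊢
        simp [hk, Bool.and_comm]
    rw [hfilter]
    have hsingle : List.filter (pvSurv rest) [u] = if pvSurv rest u then [u] else [] := by
      by_cases hs : pvSurv rest u = true <;> simp [hs]
    rw [hsingle]
    simp

theorem pvSetContains_iff (s : PySem.Set String) (x : String) :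
    PySem.Set.contains s x = true ↔ x ∈ s := by
  simp [PySem.Set.contains]

theorem pvAltDedup_append (l1 l2 : List (List (String × String))) (s : PySem.Set String) :
    pvAltDedup (l1 ++ l2) s =
      ((pvAltDedup l1 s).1 ++ (pvAltDedup l2 (pvAltDedup l1 s).2).1,
       (pvAltDedup l2 (pvAltDedup l1 s).2).2) := by
  induction l1 generalizing s with
  | nil => simp [pvAltDedup]
  | cons u rest ih =>
    simp only [List.cons_append, pvAltDedup]
    by_cases h : (pvGetD u "dedupe_key" "" != "" && PySem.Set.contains s (pvGetD u "dedupe_key" "")) = true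
    · simp only [if_pos h]
      exact ih s
    · simp only [if_neg h]
      rw [ih]
      simp

-- membership in the seen-set after the reverse pass: exactly the nonempty keys seen
theorem pvAltDedup_seen (l : List (List (String × String))) (s : PySem.Set String) (x : String) :
    x ∈ (pvAltDedup l s).2 ↔ x ∈ s ∨ ∃ u ∈ l, pvKey u ≠ "" ∧ pvKey u = x := by
  induction l generalizing s with
  | nil => simp [pvAltDedup]
  | cons u rest ih =>
    simp only [pvAltDedup]
    by_cases h : (pvGetD u "dedupe_key" "" != "" && PySem.Set.contains s (pvGetD u "dedupe_key" "")) = true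
    · rw [if_pos h, ih]
      simp only [Bool.and_eq_true, bne_iff_ne, ne_eq, pvSetContains_iff] at h
      constructor
      · rintro (hs | ⟨v, hv, h1, h2⟩)
        · exact Or.inl hs
        · exact Or.inr ⟨v, List.mem_cons_of_mem _ hv, h1, h2⟩
      · rintro (hs | ⟨v, hv, h1, h2⟩)
        · exact Or.inl hs
        · rcases List.mem_cons.mp hv with rfl | hv'
          · subst h2
            exact Or.inl h.2
          · exact Or.inr ⟨v, hv', h1, h2⟩
    · rw [if_neg h, ih]
      by_cases hk : pvGetD u "dedupe_key" "" = ""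
      · rw [if_neg (by simp [hk])]
        constructor
        · rintro (hs | ⟨v, hv, h1, h2⟩)
          · exact Or.inl hs
          · exact Or.inr ⟨v, List.mem_cons_of_mem _ hv, h1, h2⟩
        · rintro (hs | ⟨v, hv, h1, h2⟩)
          · exact Or.inl hs
          · rcases List.mem_cons.mp hv with rfl | hv'
            · exact absurd hk (by simpa [pvKey] using h1)
            · exact Or.inr ⟨v, hv', h1, h2⟩
      · rw [if_pos (by simpa [bne_iff_ne] using hk)]
        constructor
        · rintro (hs | ⟨v, hv, h1, h2⟩)
          · rcases (PySem.Set.mem_add s (pvGetD u "dedupe_key" "") x).mp hs with hs' | rfl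
            · exact Or.inl hs'
            · exact Or.inr ⟨u, List.mem_cons_self, by simpa [pvKey] using hk, rfl⟩
          · exact Or.inr ⟨v, List.mem_cons_of_mem _ hv, h1, h2⟩
        · rintro (hs | ⟨v, hv, h1, h2⟩)
          · exact Or.inl ((PySem.Set.mem_add s _ x).mpr (Or.inl hs))
          · rcases List.mem_cons.mp hv with rfl | hv'
            · exact Or.inl ((PySem.Set.mem_add s _ x).mpr (Or.inr (by simpa [pvKey] using h2.symm)))
            · exact Or.inr ⟨v, hv', h1, h2⟩

-- B's kept list (as processed from the back), with the seen-set expressed over the remaining updates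
def pvKeptB (s : PySem.Set String) : List (List (String × String)) → List (List (String × String))
  | [] => []
  | u :: rest =>
    (if pvKey u != "" && (PySem.Set.contains s (pvKey u) || rest.any (fun v => pvKey v != "" && pvKey v == pvKey u))
     then [] else [u]) ++ pvKeptB s rest

theorem pvAltDedup_kept (us : List (List (String × String))) (s : PySem.Set String) :
    (pvAltDedup us.reverse s).1.reverse = pvKeptB s us := by
  induction us with
  | nil => simp [pvAltDedup, pvKeptB]
  | cons u rest ih =>
    simp only [List.reverse_cons, pvKeptB]
    rw [pvAltDedup_append]
    simp only [List.reverse_append]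
    rw [ih]
    have hcond : (pvGetD u "dedupe_key" "" != "" && PySem.Set.contains (pvAltDedup rest.reverse s).2 (pvGetD u "dedupe_key" ""))
        = (pvKey u != "" && (PySem.Set.contains s (pvKey u) || rest.any (fun v => pvKey v != "" && pvKey v == pvKey u))) := by
      rw [Bool.eq_iff_iff]
      simp only [Bool.and_eq_true, Bool.or_eq_true, bne_iff_ne, ne_eq, pvSetContains_iff,
        List.any_eq_true, beq_iff_eq, pvKey]
      rw [pvAltDedup_seen]
      simp only [List.mem_reverse]
      constructor
      · rintro ⟨h1, hs | ⟨v, hv, h2, h3⟩⟩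
        · exact ⟨h1, Or.inl hs⟩
        · exact ⟨h1, Or.inr ⟨v, hv, h2, h3⟩⟩
      · rintro ⟨h1, hs | ⟨v, hv, h2, h3⟩⟩
        · exact ⟨h1, Or.inl hs⟩
        · exact ⟨h1, Or.inr ⟨v, hv, h2, h3⟩⟩
    congr 1
    simp only [pvAltDedup]
    rw [hcond]
    by_cases h : (pvKey u != "" && (PySem.Set.contains s (pvKey u) || rest.any (fun v => pvKey v != "" && pvKey v == pvKey u))) = true
    · rw [if_pos h, if_pos h]
      simp
    · rw [if_neg h, if_neg h]
      simp

-- A's survive test for an item that actually carries a "dedupe_key" entry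
theorem pvSurv_of_get_some (item : List (String × String)) (k : String)
    (h : pvGet? item "dedupe_key" = some k) (us : List (List (String × String))) :
    pvSurv us item = !(us.any (fun u => pvKey u != "" && pvKey u == k)) := by
  rw [Bool.eq_iff_iff, Bool.not_eq_true', Bool.eq_false_iff]
  simp only [pvSurv, List.all_eq_true, List.any_eq_true, Bool.and_eq_true, Bool.or_eq_true,
    bne_iff_ne, beq_iff_eq, ne_eq, h, Option.some.injEq]
  push Not
  constructor
  · intro hall v hv h1 h2
    rcases hall v hv with h3 | h3
    · exact h1 h3
    · exact h3 h2.symm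
  · intro hall v hv
    by_cases h1 : pvKey v = ""
    · exact Or.inl h1
    · exact Or.inr (fun hk => hall v hv h1 hk.symm)

-- per-update agreement of A's survive test with B's (empty-seen) membership test
theorem pvSurv_eq_keptB_cond (u : List (String × String)) (rest : List (List (String × String))) :
    pvSurv rest u = !(pvKey u != "" && rest.any (fun v => pvKey v != "" && pvKey v == pvKey u)) := by
  rcases hg : pvGet? u "dedupe_key" with _ | w
  · have hk : pvKey u = "" := by simp [pvKey, pvGetD, hg]
    rw [hk]
    simp only [bne_self_eq_false, Bool.false_and, Bool.not_false]
    simp only [pvSurv, List.all_eq_true, hg]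
    intro v _
    by_cases hv : pvKey v = "" <;> simp [hv]
  · have hk : pvKey u = w := by simp [pvKey, pvGetD, hg]
    rw [hk, pvSurv_of_get_some u w hg rest]
    by_cases hw : w = ""
    · subst hw
      simp only [bne_self_eq_false, Bool.false_and, Bool.not_false, Bool.not_eq_true',
        List.any_eq_false]
      intro v _
      by_cases hv : pvKey v = "" <;> simp [hv]
    · simp [bne_iff_ne, hw]

theorem pvKeptA_eq_keptB (us : List (List (String × String))) :
    pvKeptA us = pvKeptB PySem.Set.empty us := by
  induction us with
  | nil => rfl
  | cons u rest ih =>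
    simp only [pvKeptA, pvKeptB, ih]
    congr 1
    have hempty : PySem.Set.contains (PySem.Set.empty : PySem.Set String) (pvKey u) = false := rfl
    rw [pvSurv_eq_keptB_cond, hempty, Bool.false_or]
    cases hc : (pvKey u != "" && rest.any (fun v => pvKey v != "" && pvKey v == pvKey u)) <;> simp

theorem pvGet?_norm_dedupe (item : List (String × String)) :
    pvGet? (pvNorm item) "dedupe_key" = some (pvGetD item "dedupe_key" "") := by
  simp [pvGet?, pvNorm, List.find?]

theorem pvGetD_norm_dedupe (item : List (String × String)) :
    pvGetD (pvNorm item) "dedupe_key" "" = pvGetD item "dedupe_key" "" := by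
  simp [pvGetD, pvGet?_norm_dedupe]

-- survivors agree: A's filter over the normalized list = B's single pass over existing
theorem pvSurvivors_eq (updates : List (List (String × String))) (existing : List (List (String × String))) :
    ((existing.filter (fun item => pvGetD item "summary" "" != "")).map pvNorm).filter (pvSurv updates)
      = pvAltSurvivors (pvAltDedup updates.reverse PySem.Set.empty).2 existing := by
  induction existing with
  | nil => rfl
  | cons item rest ih =>
    simp only [pvAltSurvivors, List.filter_cons]
    by_cases hs : (pvGetD item "summary" "" != "") = true
    · rw [if_pos hs, if_pos hs, List.map_cons, List.filter_cons]
      have hsurv : pvSurv updates (pvNorm item)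
          = !(updates.any (fun u => pvKey u != "" && pvKey u == pvGetD item "dedupe_key" "")) :=
        pvSurv_of_get_some _ _ (pvGet?_norm_dedupe item) updates
      have hseen : PySem.Set.contains (pvAltDedup updates.reverse PySem.Set.empty).2 (pvGetD (pvNorm item) "dedupe_key" "")
          = updates.any (fun u => pvKey u != "" && pvKey u == pvGetD item "dedupe_key" "") := by
        rw [pvGetD_norm_dedupe, Bool.eq_iff_iff, pvSetContains_iff, pvAltDedup_seen]
        simp only [List.mem_reverse, List.any_eq_true, Bool.and_eq_true, bne_iff_ne, beq_iff_eq]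
        constructor
        · rintro (habs | ⟨v, hv, h1, h2⟩)
          · exact absurd habs (List.not_mem_nil)
          · exact ⟨v, hv, h1, h2⟩
        · rintro ⟨v, hv, h1, h2⟩
          exact Or.inr ⟨v, hv, h1, h2⟩
      rw [hseen]
      by_cases hc : updates.any (fun u => pvKey u != "" && pvKey u == pvGetD item "dedupe_key" "") = true
      · rw [if_pos hc, if_neg (by simp [hsurv, hc]), ih]
      · rw [if_neg hc, if_pos (by simp only [hsurv]; simpa using hc), ih]
    · rw [if_neg hs, if_neg hs]
      exact ih

theorem pvAltPartition_eq (l : List (List (String × String))) :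
    ∀ succ fail, pvAltPartition succ fail l =
      (succ ++ l.filter (fun item => pvGet? item "status" == some "success"),
       fail ++ l.filter (fun item => pvGet? item "status" != some "success")) := by
  induction l with
  | nil => intro succ fail; simp [pvAltPartition]
  | cons item rest ih =>
    intro succ fail
    simp only [pvAltPartition]
    by_cases h : (pvGet? item "status" == some "success") = true
    · rw [if_pos h, ih]
      have he : pvGet? item "status" = some "success" := by simpa using h
      simp [he]
    · rw [if_neg h, ih]
      have he : ¬ pvGet? item "status" = some "success" := by simpa using h
      simp [he]

-- ===== VERDICT (by name: the statement is the Claim_ definition above) =====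
theorem merge_memory_py_spec : Claim_equal_merge_memory_py := by
  intro existing updates _
  simp only [Spec_merge_memory_py, merge_memory_py, merge_memory_py_alt]
  rw [pvMergeLoopA_eq]
  rw [pvAltDedup_kept, ← pvKeptA_eq_keptB, pvSurvivors_eq, pvAltPartition_eq]
  simp [List.filter_append]
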